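-- pv_equiv track=rewrite | github.com/jeanmiclo/adventofcode | 2025/07/solution.py | part2
-- ===== SOURCE A (Python) =====
-- from collections import defaultdict
--
-- def part2(data):
--     grid = []
--     for line in data:
--         grid.append(line.rstrip())
--     start = (0, grid[0].index("S"))
--     n = len(grid)
--     dp = defaultdict(int)
--     dp[start] += 1
--     res = 1
--     for _ in range(n - 1):
--         ndp = defaultdict(int)
--         for (i, j), cur in dp.items():
--             if i == n - 1:
--                 continue
--             inc = cur
--             if grid[i + 1][j] == "^":
--                 res += cur
--                 ndp[(i + 1, j - 1)] += inc
--                 ndp[(i + 1, j + 1)] += inc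
--             else:
--                 ndp[(i + 1, j)] += inc
--         dp = ndp
--     return res
-- ===== SOURCE B (Python) =====
-- def part2(data):
--     # Backward "pull" DP: first find the reachable columns of each row going down,
--     # then count paths-to-bottom bottom-up over exactly those cells; answer = count at start.
--     grid = [line.rstrip() for line in data]
--     n = len(grid)
--     j0 = grid[0].index("S")
--     reach = [{j0}]
--     for i in range(n - 1):
--         nxt = set()
--         for j in reach[i]:
--             if grid[i + 1][j] == "^":
--                 nxt.add(j - 1)
--                 nxt.add(j + 1)
--             else:
--                 nxt.add(j)
--         reach.append(nxt)
--     f = {j: 1 for j in reach[n - 1]}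
--     for i in range(n - 2, -1, -1):
--         f = {j: (f[j - 1] + f[j + 1] if grid[i + 1][j] == "^" else f[j])
--              for j in reach[i]}
--     return f[j0]
-- ===== Notes on version B (the rewrite author's own statement) =====
-- stated objective: alternative
-- what changed: Replaces the forward row-by-row push DP (dict of (row,col) path counts, answer accumulated at each split) by a forward reachable-column-set pass followed by a backward pull DP that counts paths-to-bottom on exactly the reachable cells, returning the count at the start cell.
import Mathlib
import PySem

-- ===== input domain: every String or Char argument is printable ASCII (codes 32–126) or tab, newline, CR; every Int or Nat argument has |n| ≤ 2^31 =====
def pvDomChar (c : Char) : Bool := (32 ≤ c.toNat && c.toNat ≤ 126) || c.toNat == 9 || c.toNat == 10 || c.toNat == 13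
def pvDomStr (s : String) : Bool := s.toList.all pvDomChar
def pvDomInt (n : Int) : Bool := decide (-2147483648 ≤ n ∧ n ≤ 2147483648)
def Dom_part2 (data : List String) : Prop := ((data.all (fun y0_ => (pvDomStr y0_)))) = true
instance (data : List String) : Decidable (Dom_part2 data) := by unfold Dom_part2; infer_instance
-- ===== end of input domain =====

-- B replaces A's forward push DP (dict of (row,col) path counts, accumulating splits) by a
-- reachable-column-set pass plus a backward pull DP counting paths-to-bottom; same value on Pre_.

-- ===== PORT A =====
-- shared indexing helpers: grid = [line.rstrip() for line in data]; grid[0].index("S"); grid[i][j]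
def pvGrid (data : List String) : List String := data.map PySem.Str.rstrip

def pvStartCol (data : List String) : Int :=
  PySem.Str.find ((PySem.List.pyGet? (pvGrid data) 0).getD "") "S"

-- grid[i][j] (Python list/str indexing, negative j from the end); default only outside Pre_
def pvChAt (data : List String) (i j : Int) : Char :=
  (PySem.List.pyGet? ((PySem.List.pyGet? (pvGrid data) i).getD "").toList j).getD ' '

-- body of A's inner loop over dp.items()
def pvAinner (data : List String) (n : Int)
    (st2 : PySem.Dict (Int × Int) Int × Int) (kv : (Int × Int) × Int) :
    PySem.Dict (Int × Int) Int × Int :=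
  if kv.1.1 == n - 1 then st2
  else
    let inc := kv.2
    if pvChAt data (kv.1.1 + 1) kv.1.2 == '^' then
      let d1 := st2.1.insert (kv.1.1 + 1, kv.1.2 - 1) (st2.1.getD (kv.1.1 + 1, kv.1.2 - 1) 0 + inc)
      let d2 := d1.insert (kv.1.1 + 1, kv.1.2 + 1) (d1.getD (kv.1.1 + 1, kv.1.2 + 1) 0 + inc)
      (d2, st2.2 + inc)
    else
      (st2.1.insert (kv.1.1 + 1, kv.1.2) (st2.1.getD (kv.1.1 + 1, kv.1.2) 0 + inc), st2.2)

-- one iteration of A's outer 'for _ in range(n - 1)' loop: ndp from dp, res updated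
def pvAstep (data : List String) (n : Int)
    (st : PySem.Dict (Int × Int) Int × Int) : PySem.Dict (Int × Int) Int × Int :=
  st.1.items.foldl (pvAinner data n) (PySem.Dict.empty, st.2)

def part2 (data : List String) : Int :=
  let grid := pvGrid data
  let start : Int × Int := (0, pvStartCol data)
  let n : Int := (grid.length : Int)
  let dp : PySem.Dict (Int × Int) Int := PySem.Dict.empty
  let dp := dp.insert start (dp.getD start 0 + 1)
  ((PySem.List.pyRange 0 (n - 1) 1).foldl (fun st _ => pvAstep data n st) (dp, 1)).2

-- ===== PORT B =====
-- body of B's forward loop: the reachable columns of row i+1 from those of row i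
def pvNextRow (data : List String) (i : Int) (cur : PySem.Set Int) : PySem.Set Int :=
  cur.foldl (fun nxt j =>
    if pvChAt data (i + 1) j == '^' then
      PySem.Set.add (PySem.Set.add nxt (j - 1)) (j + 1)
    else PySem.Set.add nxt j) PySem.Set.empty
def pvBval (data : List String) (f : PySem.Dict Int Int) (i j : Int) : Int :=
  if pvChAt data (i + 1) j == '^' then f.getD (j - 1) 0 + f.getD (j + 1) 0 else f.getD j 0

def part2_alt (data : List String) : Int :=
  let grid := pvGrid data
  let n : Int := (grid.length : Int)
  let j0 := pvStartCol data
  let reach : List (PySem.Set Int) := [PySem.Set.ofList [j0]]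
  let reach := (PySem.List.pyRange 0 (n - 1) 1).foldl
      (fun reach i =>
        reach ++ [pvNextRow data i ((PySem.List.pyGet? reach i).getD PySem.Set.empty)]) reach
  let f0 : PySem.Dict Int Int :=
    ((PySem.List.pyGet? reach (n - 1)).getD PySem.Set.empty).foldl
      (fun f j => f.insert j 1) PySem.Dict.empty
  let f := (PySem.List.pyRange (n - 2) (-1) (-1)).foldl
      (fun f i =>
        ((PySem.List.pyGet? reach i).getD PySem.Set.empty).foldl
          (fun nf j => nf.insert j (pvBval data f i j)) PySem.Dict.empty) f0
  f.getD j0 0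

-- ===== PRECONDITION & SPEC =====
-- len(grid[i]) as an Int (0 outside the grid; Pre_ only uses it for rows 1..n-1)
def pvRowLen (data : List String) (i : Int) : Int :=
  (((PySem.List.pyGet? (pvGrid data) i).getD "").toList.length : Int)

-- the cells A reads in row i+1, given the columns it reads from in row i: one read per
-- reached column j; valid iff -len ≤ j < len (Python str indexing, negative wraps)
def pvStepOk (data : List String) (i : Int) (cur : PySem.Set Int) : Option (PySem.Set Int) :=
  cur.foldl (fun acc j =>
    acc.bind (fun s =>
      if -(pvRowLen data (i + 1)) ≤ j ∧ j < pvRowLen data (i + 1) then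
        some (if pvChAt data (i + 1) j == '^' then
                PySem.Set.add (PySem.Set.add s (j - 1)) (j + 1)
              else PySem.Set.add s j)
      else none)) (some PySem.Set.empty)

def pvOk (data : List String) : Bool :=
  ((PySem.List.pyRange 0 ((data.length : Int) - 1) 1).foldl
      (fun acc i => acc.bind (pvStepOk data i))
      (some (PySem.Set.ofList [pvStartCol data]))).isSome

-- Pre_ excludes EXACTLY the inputs on which Python A raises: empty data (IndexError on
-- grid[0]), no "S" in row 0 (ValueError from .index), and grids where some actually
-- performed read grid[i+1][j] has j outside Python's index range for that row
-- (IndexError); the crash set is path-dependent, so pvOk checks validity of precisely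
-- the reads both programs perform — every input A returns on satisfies Pre_.
def Pre_part2 (data : List String) : Prop :=
  data ≠ [] ∧ 0 ≤ pvStartCol data ∧ pvOk data = true
instance (data : List String) : Decidable (Pre_part2 data) := by unfold Pre_part2; infer_instance

def pvWitness_part2 : List String := ["S^.", ".^.", "..."]

def Spec_part2 (data : List String) (out : Int) : Prop := out = part2_alt data
instance (data : List String) (out : Int) : Decidable (Spec_part2 data out) := by unfold Spec_part2; infer_instance

-- ===== CLAIM (what is proved, stated in full; the proofs are below) =====
def Claim_equal_part2 : Prop := ∀ (data : List String), Dom_part2 data → Pre_part2 data → Spec_part2 data (part2 data)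

-- ===== LEMMAS AND PROOFS =====

def pvF (data : List String) : Nat → Int → Int
  | 0, _ => 1
  | d + 1, j =>
    if pvChAt data ((data.length : Int) - 1 - (d : Int)) j == '^'
    then pvF data d (j - 1) + pvF data d (j + 1)
    else pvF data d j
def pvReachSet (data : List String) : Nat → PySem.Set Int
  | 0 => PySem.Set.ofList [pvStartCol data]
  | m + 1 => pvNextRow data (m : Int) (pvReachSet data m)
theorem pvGrid_length (data : List String) : (pvGrid data).length = data.length := by simp [pvGrid]
theorem pv_getD_foldl_insertFun (l : List Int) (v : Int → Int) (d : PySem.Dict Int Int) (x : Int) :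
    (l.foldl (fun nf j => nf.insert j (v j)) d).getD x 0
      = if x ∈ l then v x else d.getD x 0 := by
  induction l generalizing d with
  | nil => simp
  | cons h t ih =>
    simp only [List.foldl_cons, ih, List.mem_cons, PySem.Dict.getD_insert]
    by_cases hxt : x ∈ t
    · simp [hxt]
    · by_cases hxh : x = h <;> simp [hxt, hxh]

-- membership is preserved by the set-building fold of pvNextRow
theorem pv_setfold_mono (data : List String) (i : Int) (l : List Int) (acc : PySem.Set Int)
    (x : Int) (hx : x ∈ acc) :
    x ∈ l.foldl (fun nxt j =>
      if pvChAt data (i + 1) j == '^' then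
        PySem.Set.add (PySem.Set.add nxt (j - 1)) (j + 1)
      else PySem.Set.add nxt j) acc := by
  induction l generalizing acc with
  | nil => exact hx
  | cons h t ih =>
    simp only [List.foldl_cons]
    apply ih
    by_cases hch : (pvChAt data (i + 1) h == '^') = true
    · rw [if_pos hch]
      simp [PySem.Set.mem_add, hx]
    · rw [if_neg hch]
      simp [PySem.Set.mem_add, hx]

-- every member of cur contributes its children to pvNextRow
theorem pv_mem_nextRow (data : List String) (i : Int) (cur : PySem.Set Int) (j : Int)
    (hj : j ∈ cur) :
    if pvChAt data (i + 1) j == '^' then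
      (j - 1) ∈ pvNextRow data i cur ∧ (j + 1) ∈ pvNextRow data i cur
    else j ∈ pvNextRow data i cur := by
  rw [pvNextRow]
  generalize hacc : (PySem.Set.empty : PySem.Set Int) = acc
  clear hacc
  induction cur generalizing acc with
  | nil => simp at hj
  | cons h t ih =>
    simp only [List.foldl_cons]
    rcases List.mem_cons.1 hj with he | ht
    · subst he
      by_cases hch : (pvChAt data (i + 1) j == '^') = true
      · rw [if_pos hch]
        refine ⟨?_, ?_⟩ <;>
        · apply pv_setfold_mono
          rw [if_pos hch]
          simp [PySem.Set.mem_add]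
      · rw [if_neg hch, if_neg hch]
        apply pv_setfold_mono
        simp [PySem.Set.mem_add]
    · exact ih ht _

-- the forward pass builds the list of reachable-column sets row by row
theorem pv_fwd (data : List String) (m : Nat) :
    ((List.range m).map (fun (k : Nat) => (k : Int))).foldl
        (fun reach i =>
          reach ++ [pvNextRow data i ((PySem.List.pyGet? reach i).getD PySem.Set.empty)])
        [PySem.Set.ofList [pvStartCol data]]
      = (List.range (m + 1)).map (fun k => pvReachSet data k) := by
  induction m with
  | zero => simp [pvReachSet]
  | succ m ih =>
    rw [List.range_succ, List.map_append, List.foldl_append, ih]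
    simp only [List.map_cons, List.map_nil, List.foldl_cons, List.foldl_nil]
    rw [PySem.List.pyGet?_natCast]
    rw [List.range_succ (n := m + 1), List.map_append]
    congr 1
    have : ((List.range (m + 1)).map (fun k => pvReachSet data k))[m]? = some (pvReachSet data m) := by
      rw [List.getElem?_map, List.getElem?_range (Nat.lt_succ_self m)]
      rfl
    rw [this]
    simp [pvReachSet]

-- B's backward fold computes pvF on every reachable cell
theorem pvB_cone2 (data : List String) (hne : data ≠ []) (m : Nat)
    (hm : m ≤ data.length - 1) (x : Int)
    (hx : x ∈ pvReachSet data (data.length - 1 - m)) :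
    (((List.range m).map (fun (k : Nat) => (data.length : Int) - 2 - (k : Int))).foldl
        (fun f i =>
          ((PySem.List.pyGet? ((List.range (data.length - 1 + 1)).map (fun k => pvReachSet data k)) i).getD PySem.Set.empty).foldl
            (fun nf j => nf.insert j (pvBval data f i j)) PySem.Dict.empty)
        (((PySem.List.pyGet? ((List.range (data.length - 1 + 1)).map (fun k => pvReachSet data k)) ((data.length : Int) - 1)).getD PySem.Set.empty).foldl
          (fun f j => f.insert j 1) PySem.Dict.empty)).getD x 0
      = pvF data m x := by
  have hlen : 1 ≤ data.length := List.length_pos_iff.mpr hne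
  have hget : ∀ (k : Nat), k ≤ data.length - 1 →
      (PySem.List.pyGet? ((List.range (data.length - 1 + 1)).map (fun k => pvReachSet data k)) ((k : Nat) : Int)).getD PySem.Set.empty
        = pvReachSet data k := by
    intro k hk
    have hk2 : k < data.length - 1 + 1 := by omega
    rw [PySem.List.pyGet?_natCast]
    have : ((List.range (data.length - 1 + 1)).map (fun k => pvReachSet data k))[k]? = some (pvReachSet data k) := by
      rw [List.getElem?_map, List.getElem?_range hk2]
      rfl
    rw [this]
    rfl
  induction m generalizing x with
  | zero =>
    rw [show ((List.range 0).map (fun (k : Nat) => (data.length : Int) - 2 - (k : Int))) = [] from rfl,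
      List.foldl_nil]
    rw [show ((data.length : Int) - 1) = (((data.length - 1 : Nat) : Nat) : Int) by omega,
      hget (data.length - 1) le_rfl, pv_getD_foldl_insertFun]
    rw [if_pos (by simpa using hx)]
    rfl
  | succ m ih =>
    have hm' : m ≤ data.length - 1 := by omega
    rw [List.range_succ (n := m), List.map_append, List.foldl_append]
    simp only [List.map_cons, List.map_nil, List.foldl_cons, List.foldl_nil]
    rw [show ((data.length : Int) - 2 - (m : Int)) = (((data.length - 2 - m : Nat) : Nat) : Int) by omega,
      hget (data.length - 2 - m) (by omega), pv_getD_foldl_insertFun]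
    have hxm : x ∈ pvReachSet data (data.length - 2 - m) := by
      rw [show data.length - 2 - m = data.length - 1 - (m + 1) by omega]
      exact hx
    rw [if_pos hxm, pvBval]
    have hchild := pv_mem_nextRow data ((data.length - 2 - m : Nat) : Int)
      (pvReachSet data (data.length - 2 - m)) x hxm
    have hreach_succ : pvReachSet data (data.length - 2 - m + 1)
        = pvNextRow data ((data.length - 2 - m : Nat) : Int) (pvReachSet data (data.length - 2 - m)) := by
      rfl
    have hidx : data.length - 2 - m + 1 = data.length - 1 - m := by omega
    have hcast : ((data.length - 2 - m : Nat) : Int) + 1 = (data.length : Int) - 1 - (m : Int) := by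
      omega
    simp only [pvF]
    by_cases hch : (pvChAt data ((data.length : Int) - 1 - (m : Int)) x == '^') = true
    · rw [hcast, if_pos hch] at hchild
      have h1 : (x - 1) ∈ pvReachSet data (data.length - 1 - m) := by
        rw [← hidx, hreach_succ]
        exact hchild.1
      have h2 : (x + 1) ∈ pvReachSet data (data.length - 1 - m) := by
        rw [← hidx, hreach_succ]
        exact hchild.2
      rw [hcast, if_pos hch, if_pos hch, ih hm' (x - 1) h1, ih hm' (x + 1) h2]
    · rw [hcast, if_neg hch] at hchild
      have h1 : x ∈ pvReachSet data (data.length - 1 - m) := by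
        rw [← hidx, hreach_succ]
        exact hchild
      rw [hcast, if_neg hch, if_neg hch, ih hm' x h1]

theorem pvB_eq_F (data : List String) (hne : data ≠ []) :
    part2_alt data = pvF data (data.length - 1) (pvStartCol data) := by
  have hlen : 1 ≤ data.length := List.length_pos_iff.mpr hne
  simp only [part2_alt, pvGrid_length]
  rw [PySem.List.pyRange_one]
  simp only [zero_add]
  rw [show (((data.length : Int) - 1) - 0).toNat = data.length - 1 by omega]
  rw [pv_fwd data (data.length - 1)]
  rw [PySem.List.pyRange_neg_one]
  rw [show (((data.length : Int) - 2) - (-1)).toNat = data.length - 1 by omega]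
  refine pvB_cone2 data hne (data.length - 1) le_rfl (pvStartCol data) ?_
  rw [show data.length - 1 - (data.length - 1) = 0 by omega]
  simp [pvReachSet, PySem.Set.mem_ofList]

-- weighted sum of a dict's items
def pvS (W : Int × Int → Int) (d : PySem.Dict (Int × Int) Int) : Int :=
  (d.items.map (fun kv => kv.2 * W kv.1)).sum

theorem pv_sum_overwrite_list (l : List ((Int × Int) × Int)) (k : Int × Int) (v' : Int)
    (W : Int × Int → Int) (hnd : (l.map Prod.fst).Nodup) (v0 : Int) (h : (k, v0) ∈ l) :
    ((l.map (fun p => if p.1 == k then (k, v') else p)).map (fun p => p.2 * W p.1)).sum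
      = (l.map (fun p => p.2 * W p.1)).sum + (v' - v0) * W k := by
  induction l with
  | nil => simp at h
  | cons p t ih =>
    simp only [List.map_cons, List.nodup_cons, List.mem_map] at hnd
    rcases List.mem_cons.1 h with he | ht
    · subst he
      simp only [List.map_cons, List.sum_cons, beq_self_eq_true, if_pos]
      have hmap : (t.map (fun p => if p.1 == k then (k, v') else p)) = t.map id := by
        apply List.map_congr_left
        intro q hq
        have hqk : q.1 ≠ k := fun hk => hnd.1 ⟨q, hq, hk⟩
        simp [hqk]
      rw [hmap, List.map_id]; ring
    · have hpk : p.1 ≠ k := fun hk => hnd.1 ⟨(k, v0), ht, by rw [hk]⟩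
      simp only [List.map_cons, List.sum_cons, beq_iff_eq, if_neg hpk]
      have := ih hnd.2 ht
      simp only [beq_iff_eq] at this
      rw [this]; ring

theorem pvS_insert_bump (d : PySem.Dict (Int × Int) Int) (k : Int × Int) (c : Int)
    (W : Int × Int → Int) (hnd : d.keys.Nodup) :
    pvS W (d.insert k (d.getD k 0 + c)) = pvS W d + c * W k := by
  by_cases hc : d.contains k
  · rw [pvS, PySem.Dict.items_insert_of_contains _ _ hc]
    obtain ⟨v0, hv0⟩ : ∃ v0, d.get? k = some v0 := by
      rw [PySem.Dict.contains_eq_isSome_get?] at hc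
      exact Option.isSome_iff_exists.mp hc
    have hmem : (k, v0) ∈ d.items := PySem.Dict.mem_items_of_get?_eq_some _ hv0
    have hgd : d.getD k 0 = v0 := PySem.Dict.getD_of_get?_eq_some _ _ hv0
    have hnd' : (d.items.map Prod.fst).Nodup := by
      simpa [PySem.Dict.keys] using hnd
    rw [pv_sum_overwrite_list d.items k (d.getD k 0 + c) W hnd' v0 hmem]
    rw [hgd, pvS]; ring
  · rw [pvS, PySem.Dict.items_insert_of_not_contains _ _ (by simpa using hc)]
    rw [PySem.Dict.getD_of_not_contains _ _ (by simpa using hc)]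
    simp [pvS]

-- A's inner loop invariant
theorem pvA_inner (data : List String) (t : Nat) (ht : t + 2 ≤ data.length)
    (l : List ((Int × Int) × Int)) (hl : ∀ kv ∈ l, kv.1.1 = (t : Int)) :
    ∀ (d : PySem.Dict (Int × Int) Int) (r : Int), d.keys.Nodup →
      (∀ kv ∈ d.items, kv.1.1 = (t : Int) + 1) →
      (l.foldl (pvAinner data (data.length : Int)) (d, r)).1.keys.Nodup ∧
      (∀ kv ∈ (l.foldl (pvAinner data (data.length : Int)) (d, r)).1.items,
          kv.1.1 = (t : Int) + 1) ∧
      (l.foldl (pvAinner data (data.length : Int)) (d, r)).2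
          + pvS (fun kv => pvF data (data.length - 2 - t) kv.2 - 1)
              (l.foldl (pvAinner data (data.length : Int)) (d, r)).1
        = r + pvS (fun kv => pvF data (data.length - 2 - t) kv.2 - 1) d
            + (l.map (fun kv => kv.2 * (pvF data (data.length - 1 - t) kv.1.2 - 1))).sum := by
  induction l with
  | nil =>
    intro d r hnd hd
    exact ⟨hnd, hd, by simp⟩
  | cons kv tl ih =>
    intro d r hnd hd
    have hrow : kv.1.1 = (t : Int) := hl kv List.mem_cons_self
    have hlt : ∀ kv' ∈ tl, kv'.1.1 = (t : Int) := fun kv' h => hl kv' (List.mem_cons_of_mem _ h)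
    have hnlast : (kv.1.1 == (data.length : Int) - 1) = false := by
      simp only [beq_eq_false_iff_ne, ne_eq, hrow]
      omega
    have hF : pvF data (data.length - 1 - t) kv.1.2 =
        (if pvChAt data (kv.1.1 + 1) kv.1.2 == '^'
          then pvF data (data.length - 2 - t) (kv.1.2 - 1) + pvF data (data.length - 2 - t) (kv.1.2 + 1)
          else pvF data (data.length - 2 - t) kv.1.2) := by
      have hsub : data.length - 1 - t = (data.length - 2 - t) + 1 := by omega
      rw [hsub]
      simp only [pvF]
      rw [show (data.length : Int) - 1 - ((data.length - 2 - t : Nat) : Int) = kv.1.1 + 1 by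
        rw [hrow]; omega]
    simp only [List.foldl_cons]
    by_cases hch : (pvChAt data (kv.1.1 + 1) kv.1.2 == '^') = true
    · have hstep : pvAinner data (data.length : Int) (d, r) kv =
          ((d.insert (kv.1.1 + 1, kv.1.2 - 1) (d.getD (kv.1.1 + 1, kv.1.2 - 1) 0 + kv.2)).insert
              (kv.1.1 + 1, kv.1.2 + 1)
              ((d.insert (kv.1.1 + 1, kv.1.2 - 1) (d.getD (kv.1.1 + 1, kv.1.2 - 1) 0 + kv.2)).getD
                  (kv.1.1 + 1, kv.1.2 + 1) 0 + kv.2),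
            r + kv.2) := by
        simp [pvAinner, hnlast, hch]
      rw [hstep]
      set d1 := d.insert (kv.1.1 + 1, kv.1.2 - 1) (d.getD (kv.1.1 + 1, kv.1.2 - 1) 0 + kv.2) with hd1
      set d2 := d1.insert (kv.1.1 + 1, kv.1.2 + 1) (d1.getD (kv.1.1 + 1, kv.1.2 + 1) 0 + kv.2) with hd2
      have hnd1 : d1.keys.Nodup := PySem.Dict.nodup_keys_insert _ _ _ hnd
      have hnd2 : d2.keys.Nodup := PySem.Dict.nodup_keys_insert _ _ _ hnd1
      have hd1rows : ∀ p ∈ d1.items, p.1.1 = (t : Int) + 1 := by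
        intro p hp
        rcases (PySem.Dict.mem_items_insert _ _ _ _).1 hp with he | ⟨hmem, _⟩
        · rw [he, hrow]
        · exact hd p hmem
      have hd2rows : ∀ p ∈ d2.items, p.1.1 = (t : Int) + 1 := by
        intro p hp
        rcases (PySem.Dict.mem_items_insert _ _ _ _).1 hp with he | ⟨hmem, _⟩
        · rw [he, hrow]
        · exact hd1rows p hmem
      obtain ⟨c1, c2, c3⟩ := ih hlt d2 (r + kv.2) hnd2 hd2rows
      refine ⟨c1, c2, ?_⟩
      rw [c3, hd2, pvS_insert_bump _ _ _ _ hnd1, hd1, pvS_insert_bump _ _ _ _ hnd]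
      simp only [List.map_cons, List.sum_cons]
      rw [hF, if_pos hch]
      ring
    · have hstep : pvAinner data (data.length : Int) (d, r) kv =
          (d.insert (kv.1.1 + 1, kv.1.2) (d.getD (kv.1.1 + 1, kv.1.2) 0 + kv.2), r) := by
        simp [pvAinner, hnlast, hch]
      rw [hstep]
      set d1 := d.insert (kv.1.1 + 1, kv.1.2) (d.getD (kv.1.1 + 1, kv.1.2) 0 + kv.2) with hd1
      have hnd1 : d1.keys.Nodup := PySem.Dict.nodup_keys_insert _ _ _ hnd
      have hd1rows : ∀ p ∈ d1.items, p.1.1 = (t : Int) + 1 := by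
        intro p hp
        rcases (PySem.Dict.mem_items_insert _ _ _ _).1 hp with he | ⟨hmem, _⟩
        · rw [he, hrow]
        · exact hd p hmem
      obtain ⟨c1, c2, c3⟩ := ih hlt d1 r hnd1 hd1rows
      refine ⟨c1, c2, ?_⟩
      rw [c3, hd1, pvS_insert_bump _ _ _ _ hnd]
      simp only [List.map_cons, List.sum_cons]
      rw [hF, if_neg hch]
      ring

-- A's outer loop invariant
theorem pvA_outer (data : List String) (hne : data ≠ []) (s : Nat) (hs : s ≤ data.length - 1) :
    ((List.range s).foldl (fun st _ => pvAstep data (data.length : Int) st)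
        (PySem.Dict.empty.insert ((0 : Int), pvStartCol data)
          ((PySem.Dict.empty : PySem.Dict (Int × Int) Int).getD ((0 : Int), pvStartCol data) 0 + 1), 1)).1.keys.Nodup ∧
    (∀ kv ∈ ((List.range s).foldl (fun st _ => pvAstep data (data.length : Int) st)
        (PySem.Dict.empty.insert ((0 : Int), pvStartCol data)
          ((PySem.Dict.empty : PySem.Dict (Int × Int) Int).getD ((0 : Int), pvStartCol data) 0 + 1), 1)).1.items, kv.1.1 = (s : Int)) ∧
    ((List.range s).foldl (fun st _ => pvAstep data (data.length : Int) st)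
        (PySem.Dict.empty.insert ((0 : Int), pvStartCol data)
          ((PySem.Dict.empty : PySem.Dict (Int × Int) Int).getD ((0 : Int), pvStartCol data) 0 + 1), 1)).2
        + pvS (fun kv => pvF data (data.length - 1 - s) kv.2 - 1)
            ((List.range s).foldl (fun st _ => pvAstep data (data.length : Int) st)
              (PySem.Dict.empty.insert ((0 : Int), pvStartCol data)
                ((PySem.Dict.empty : PySem.Dict (Int × Int) Int).getD ((0 : Int), pvStartCol data) 0 + 1), 1)).1
      = pvF data (data.length - 1) (pvStartCol data) := by
  induction s with
  | zero =>
    simp only [List.range_zero, List.foldl_nil]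
    refine ⟨PySem.Dict.nodup_keys_insert _ _ _ PySem.Dict.nodup_keys_empty, ?_, ?_⟩
    · intro kv hkv
      have hitems : (PySem.Dict.empty : PySem.Dict (Int × Int) Int).items = [] := rfl
      rcases (PySem.Dict.mem_items_insert _ _ _ _).1 hkv with he | ⟨hmem, _⟩
      · simp [he]
      · rw [hitems] at hmem
        simp at hmem
    · have hitems : (PySem.Dict.empty : PySem.Dict (Int × Int) Int).items = [] := rfl
      rw [pvS, PySem.Dict.items_insert_of_not_contains _ _ (by simp), hitems]
      simp [PySem.Dict.getD_empty]
  | succ s ih =>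
    have hs' : s ≤ data.length - 1 := by omega
    have hlen : 1 ≤ data.length := List.length_pos_iff.mpr hne
    have ht : s + 2 ≤ data.length := by omega
    obtain ⟨hnd, hrows, hsum⟩ := ih hs'
    rw [List.range_succ, List.foldl_append, List.foldl_cons, List.foldl_nil]
    have hinner := pvA_inner data s ht _ hrows PySem.Dict.empty
      ((List.range s).foldl (fun st _ => pvAstep data (data.length : Int) st)
        (PySem.Dict.empty.insert ((0 : Int), pvStartCol data)
          ((PySem.Dict.empty : PySem.Dict (Int × Int) Int).getD ((0 : Int), pvStartCol data) 0 + 1), 1)).2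
      PySem.Dict.nodup_keys_empty (by intro kv hkv; rw [show (PySem.Dict.empty : PySem.Dict (Int × Int) Int).items = [] from rfl] at hkv; simp at hkv)
    rw [pvAstep]
    obtain ⟨c1, c2, c3⟩ := hinner
    refine ⟨c1, ?_, ?_⟩
    · intro kv hkv
      rw [c2 kv hkv]
      push_cast
      ring
    · have hw : data.length - 2 - s = data.length - 1 - (s + 1) := by omega
      rw [← hw]
      rw [c3]
      have hempty : pvS (fun kv => pvF data (data.length - 2 - s) kv.2 - 1) PySem.Dict.empty = 0 := by
        rw [pvS, show (PySem.Dict.empty : PySem.Dict (Int × Int) Int).items = [] from rfl]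
        simp
      rw [hempty, ← hsum, pvS]
      ring

theorem pvA_eq_F (data : List String) (hne : data ≠ []) :
    part2 data = pvF data (data.length - 1) (pvStartCol data) := by
  have hlen : 1 ≤ data.length := List.length_pos_iff.mpr hne
  simp only [part2, pvGrid_length]
  rw [PySem.List.pyRange_one, List.foldl_map]
  rw [show (((data.length : Int) - 1) - 0).toNat = data.length - 1 by omega]
  obtain ⟨-, -, hsum⟩ := pvA_outer data hne (data.length - 1) le_rfl
  have hzero : pvS (fun kv => pvF data (data.length - 1 - (data.length - 1)) kv.2 - 1)
      ((List.range (data.length - 1)).foldl (fun st _ => pvAstep data (data.length : Int) st)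
        (PySem.Dict.empty.insert ((0 : Int), pvStartCol data)
          ((PySem.Dict.empty : PySem.Dict (Int × Int) Int).getD ((0 : Int), pvStartCol data) 0 + 1), 1)).1 = 0 := by
    rw [pvS, show data.length - 1 - (data.length - 1) = 0 by omega]
    simp [pvF]
  rw [hzero] at hsum
  simpa using hsum

-- ===== VERDICT (by name: the statement is the Claim_ definition above) =====
theorem part2_spec : Claim_equal_part2 := by
  intro data _ hpre
  unfold Spec_part2
  rw [pvA_eq_F data hpre.1, pvB_eq_F data hpre.1]
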